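-- pv_equiv track=rewrite | github.com/deepanvishal/ApplyPilot | src/applypilot/ashby/search.py | title_matches
-- ===== SOURCE A (Python) =====
-- def title_matches(job_title: str, search_titles: list[str]) -> bool:
--     """
--     Match job_title against search_titles using consecutive phrase matching.
--     Only phrases of length >= 2 words are considered.
--     """
--     job_lower = job_title.lower()
--     for search_title in search_titles:
--         words = search_title.lower().split()
--         for length in range(2, len(words) + 1):
--             for start in range(len(words) - length + 1):
--                 phrase = " ".join(words[start:start + length])
--                 if phrase in job_lower:
--                     return True
--     return False
-- ===== SOURCE B (Python) =====
-- def title_matches(job_title: str, search_titles: list[str]) -> bool: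
--     """
--     Match job_title against search_titles using consecutive phrase matching.
--     Only phrases of length >= 2 words are considered.
--
--     Any >=2-word consecutive phrase contains an adjacent word PAIR, and a
--     pair occurring in the title is itself a valid phrase, so it suffices to
--     test each adjacent pair of words once.
--     """
--     job_lower = job_title.lower()
--     for search_title in search_titles:
--         words = search_title.lower().split()
--         for i in range(len(words) - 1):
--             if words[i] + " " + words[i + 1] in job_lower:
--                 return True
--     return False
-- ===== Notes on version B (the rewrite author's own statement) =====
-- stated objective: alternative
-- what changed: B replaces A's triple loop over all >=2-word phrases of every search title with a single scan over adjacent word pairs, since a >=2-word phrase occurs in the title iff some adjacent word pair does.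
import Mathlib
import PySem

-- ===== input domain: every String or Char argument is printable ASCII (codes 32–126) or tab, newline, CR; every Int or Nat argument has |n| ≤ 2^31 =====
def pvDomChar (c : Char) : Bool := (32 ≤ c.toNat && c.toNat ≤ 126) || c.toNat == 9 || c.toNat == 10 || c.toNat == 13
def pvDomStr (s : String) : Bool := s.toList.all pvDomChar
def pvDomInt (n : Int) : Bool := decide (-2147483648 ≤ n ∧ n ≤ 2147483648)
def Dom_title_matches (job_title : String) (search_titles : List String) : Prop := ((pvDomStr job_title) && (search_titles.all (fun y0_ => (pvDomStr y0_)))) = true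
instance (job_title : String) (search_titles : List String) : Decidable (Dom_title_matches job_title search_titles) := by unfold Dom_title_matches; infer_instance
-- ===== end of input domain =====

-- B checks only adjacent word pairs: a ≥2-word phrase occurs in the title iff some adjacent
-- word pair does, so the single pair scan is an exact replacement for A's all-phrases scan.

-- ===== PORT A =====
def title_matches (job_title : String) (search_titles : List String) : Bool :=
  let job_lower := PySem.Str.lower job_title
  search_titles.any (fun search_title =>
    let words := PySem.Str.split₀ (PySem.Str.lower search_title)
    (PySem.List.pyRange 2 ((words.length : Int) + 1) 1).any (fun length =>
      (PySem.List.pyRange 0 ((words.length : Int) - length + 1) 1).any (fun start =>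
        let phrase := PySem.Str.join " " (PySem.List.slice words (some start) (some (start + length)))
        PySem.Str.isIn phrase job_lower)))

-- ===== PORT B =====
def title_matches_alt (job_title : String) (search_titles : List String) : Bool :=
  let job_lower := PySem.Str.lower job_title
  search_titles.any (fun search_title =>
    let words := PySem.Str.split₀ (PySem.Str.lower search_title)
    (PySem.List.pyRange 0 ((words.length : Int) - 1) 1).any (fun i =>
      PySem.Str.isIn (PySem.List.pyGetD words i "" ++ " " ++ PySem.List.pyGetD words (i + 1) "") job_lower))

-- ===== PRECONDITION & SPEC =====
def Spec_title_matches (job_title : String) (search_titles : List String) (out : Bool) : Prop := out = title_matches_alt job_title search_titles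
instance (job_title : String) (search_titles : List String) (out : Bool) : Decidable (Spec_title_matches job_title search_titles out) := by unfold Spec_title_matches; infer_instance

-- ===== CLAIM (what is proved, stated in full; the proofs are below) =====
def Claim_equal_title_matches : Prop := ∀ (job_title : String) (search_titles : List String), Dom_title_matches job_title search_titles → Spec_title_matches job_title search_titles (title_matches job_title search_titles)

-- ===== LEMMAS AND PROOFS =====

-- the first element of a joined nonempty list is a prefix of the join
lemma head_prefix_join (sep y : List Char) (rest : List (List Char)) :
    y <+: PySem.Chars.join sep (y :: rest) := by
  cases rest with
  | nil => simp [PySem.Chars.join_singleton]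
  | cons z t =>
      rw [PySem.Chars.join_cons_cons, List.append_assoc]
      exact List.prefix_append _ _

-- the adjacent pair at the front of a ≥2-element join is a prefix of the join
lemma pair_prefix_join (sep x y : List Char) (rest : List (List Char)) :
    (x ++ sep ++ y) <+: PySem.Chars.join sep (x :: y :: rest) := by
  rw [PySem.Chars.join_cons_cons]
  obtain ⟨t, ht⟩ := head_prefix_join sep y rest
  exact ⟨t, by simp only [List.append_assoc, ht]⟩

-- per-search-title core: A's phrase scan equals B's adjacent-pair scan
lemma inner_eq (jl : String) (words : List String) :
    ((PySem.List.pyRange 2 ((words.length : Int) + 1) 1).any (fun length =>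
      (PySem.List.pyRange 0 ((words.length : Int) - length + 1) 1).any (fun start =>
        PySem.Str.isIn (PySem.Str.join " " (PySem.List.slice words (some start) (some (start + length)))) jl)))
    = (PySem.List.pyRange 0 ((words.length : Int) - 1) 1).any (fun i =>
        PySem.Str.isIn (PySem.List.pyGetD words i "" ++ " " ++ PySem.List.pyGetD words (i + 1) "") jl) := by
  rw [Bool.eq_iff_iff]
  simp only [List.any_eq_true, PySem.List.mem_pyRange_one]
  constructor
  · rintro ⟨L, ⟨hL2, hLn⟩, s, ⟨hs0, hsn⟩, h⟩
    have hsL : 0 ≤ s + L := by omega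
    rw [PySem.List.slice_toNat words hs0 hsL] at h
    have htn : (s + L).toNat - s.toNat = L.toNat := by omega
    have hi2 : s.toNat + 2 ≤ words.length := by omega
    obtain ⟨k, hk⟩ : ∃ k, L.toNat = k + 2 := ⟨L.toNat - 2, by omega⟩
    rw [htn, hk, List.drop_eq_getElem_cons (by omega : s.toNat < words.length),
        List.drop_eq_getElem_cons (by omega : s.toNat + 1 < words.length),
        List.take_succ_cons, List.take_succ_cons] at h
    rw [PySem.Str.isIn_iff_infix, PySem.Str.toList_join, List.map_cons, List.map_cons] at h
    refine ⟨s, ⟨hs0, by omega⟩, ?_⟩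
    rw [PySem.List.pyGetD_eq_getElem words "" hs0 (by omega),
        PySem.List.pyGetD_eq_getElem words "" (by omega) (by omega)]
    have hst : (s + 1).toNat = s.toNat + 1 := by omega
    simp only [hst]
    rw [PySem.Str.isIn_iff_infix]
    have hp : (words[s.toNat].toList ++ " ".toList ++ words[s.toNat + 1].toList) <+:
        PySem.Chars.join " ".toList (words[s.toNat].toList :: words[s.toNat + 1].toList ::
          List.map String.toList (List.take k (List.drop (s.toNat + 1 + 1) words))) :=
      pair_prefix_join _ _ _ _
    rw [String.toList_append, String.toList_append]
    exact hp.isInfix.trans h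
  · rintro ⟨i, ⟨hi0, hin⟩, h⟩
    have hlt : i.toNat + 1 < words.length := by omega
    refine ⟨2, ⟨le_refl _, by omega⟩, i, ⟨hi0, by omega⟩, ?_⟩
    rw [PySem.List.slice_toNat words hi0 (by omega)]
    have h2 : (i + 2).toNat - i.toNat = 2 := by omega
    rw [h2,
        List.drop_eq_getElem_cons (by omega : i.toNat < words.length),
        List.drop_eq_getElem_cons hlt,
        List.take_succ_cons, List.take_succ_cons, List.take_zero]
    rw [PySem.List.pyGetD_eq_getElem words "" hi0 (by omega),
        PySem.List.pyGetD_eq_getElem words "" (by omega) (by omega)] at h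
    have hst : (i + 1).toNat = i.toNat + 1 := by omega
    simp only [hst] at h
    rw [PySem.Str.isIn_iff_infix] at h
    rw [String.toList_append, String.toList_append] at h
    rw [PySem.Str.isIn_iff_infix, PySem.Str.toList_join]
    simp only [List.map_cons, List.map_nil, PySem.Chars.join_cons_cons, PySem.Chars.join_singleton]
    exact h

-- ===== VERDICT (by name: the statement is the Claim_ definition above) =====
theorem title_matches_spec : Claim_equal_title_matches := by
  intro job_title search_titles _
  unfold Spec_title_matches title_matches title_matches_alt
  simp only []
  exact congrArg _ (funext fun st => inner_eq _ _)
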